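-- pv_equiv track=rewrite | github.com/praak/cloud_computing | HW4/isprime_best_maybe.py | mapfn
-- ===== SOURCE A (Python) =====
-- def mapfn(k, v):
--     import math
-- # // leastFactor(n)
-- # // returns the smallest prime that divides n
-- # //     NaN if n is NaN or Infinity
-- # //      0  if n=0
-- # //      1  if n=1, n=-1, or n is not an integer
--
--     def leastFactor(n):
--         if (n == 0):
--             return 0
--         if (n%1):
--             return 1
--         if ((n%2)==0):
--             return 2
--         if ((n%3)==0):
--             return 3
--         if ((n%5)==0):
--             return 5
--         m = int(math.sqrt(n));
--         for i in range(7,m+1,30):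
--             if (n%i==0):
--                 return i
--             if (n%(i+4)==0):
--                 return i+4
--             if (n%(i+6)==0):
--                 return i+6
--             if (n%(i+10)==0):
--                 return i+10
--             if (n%(i+12)==0):
--                 return i+12
--             if (n%(i+16)==0):
--                 return i+16
--             if (n%(i+22)==0):
--                 return i+22
--             if (n%(i+24)==0):
--                 return i+24
--         return n;
--
--     # def isPrime(v):
--     #     flag = 1
--     #     # print v,'isPrime'
--     #     for i in (range(2,((int(math.ceil(math.sqrt(v))))+1))):
--     #         if ((v % i) is 0):
--     #             flag = 0
--     #             break
--     #     # print flag,'after prime check'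
--     #     return flag
--     def isPrime(v):
--         if (v % 1) or (v<2):
--             return False;
--         if (v == leastFactor(v)):
--             return True;
--         return False;
--
--     # if ((v % 2) is not 0) or ((v % 3) is not 0) or ((v % 5) is not 0) or ((v % 7) is not 0):
--     num = str(v)
--     if (num == num[::-1]):
--         if (isPrime(v) == 1):
--             yield 'PaliPrimes',int(v)
-- ===== SOURCE B (Python) =====
-- def mapfn(k, v):
--     import math
--     num = str(v)
--     if num == num[::-1]:
--         # v >= 2 is prime  iff  gcd(v, floor(sqrt(v))!) == 1:
--         # any composite v has a prime factor <= isqrt(v), which then divides the factorial;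
--         # a prime v shares no factor with numbers <= isqrt(v) < v.
--         if v >= 2 and math.gcd(v, math.factorial(math.isqrt(v))) == 1:
--             yield 'PaliPrimes', int(v)
-- ===== Notes on version B (the rewrite author's own statement) =====
-- stated objective: alternative
-- what changed: Primality is decided by a single gcd of v with the factorial of isqrt(v) (v>=2 is prime iff gcd(v, isqrt(v)!) == 1) instead of A's wheel-factorization trial-division loop; the leastFactor helper and all division loops disappear.
import Mathlib
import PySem

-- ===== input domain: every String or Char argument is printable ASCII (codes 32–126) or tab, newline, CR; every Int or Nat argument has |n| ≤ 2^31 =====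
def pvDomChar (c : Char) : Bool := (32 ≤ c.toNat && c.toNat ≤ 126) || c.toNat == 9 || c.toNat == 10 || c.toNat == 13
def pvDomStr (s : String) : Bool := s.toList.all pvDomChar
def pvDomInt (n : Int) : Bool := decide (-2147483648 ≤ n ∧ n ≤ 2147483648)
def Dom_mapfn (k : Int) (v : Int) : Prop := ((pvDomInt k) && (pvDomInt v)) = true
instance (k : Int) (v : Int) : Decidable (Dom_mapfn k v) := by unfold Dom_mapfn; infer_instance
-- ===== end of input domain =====

-- B replaces A's wheel-factorization trial-division primality test by a single gcd with
-- the factorial of the integer square root (v ≥ 2 is prime iff gcd(v, ⌊√v⌋!) = 1);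
-- objective: alternative algorithm. Return-value equivalence is proved on the whole domain.

-- ===== PORT A =====
-- the wheel loop of leastFactor: first dividing candidate among i, i+4, …, i+24 per block
def pvWheelFind (n : Int) : List Int → Option Int
  | [] => none
  | i :: rest =>
    if PySem.Int.mod n i = 0 then some i
    else if PySem.Int.mod n (i+4) = 0 then some (i+4)
    else if PySem.Int.mod n (i+6) = 0 then some (i+6)
    else if PySem.Int.mod n (i+10) = 0 then some (i+10)
    else if PySem.Int.mod n (i+12) = 0 then some (i+12)
    else if PySem.Int.mod n (i+16) = 0 then some (i+16)
    else if PySem.Int.mod n (i+22) = 0 then some (i+22)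
    else if PySem.Int.mod n (i+24) = 0 then some (i+24)
    else pvWheelFind n rest

def pvLeastFactor (n : Int) : Int :=
  if n = 0 then 0
  else if PySem.Int.mod n 1 ≠ 0 then 1
  else if PySem.Int.mod n 2 = 0 then 2
  else if PySem.Int.mod n 3 = 0 then 3
  else if PySem.Int.mod n 5 = 0 then 5
  else
    -- m = int(math.sqrt(n)): exact = Nat.sqrt n for the 0 ≤ n ≤ 2^31 this program reaches
    -- (double sqrt is correctly rounded and cannot cross an integer there)
    let m : Int := (Nat.sqrt n.toNat : Int)
    (pvWheelFind n (PySem.List.pyRange 7 (m + 1) 30)).getD n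

def pvIsPrimeA (v : Int) : Bool :=
  if PySem.Int.mod v 1 ≠ 0 ∨ v < 2 then false
  else if v = pvLeastFactor v then true
  else false

def mapfn (k : Int) (v : Int) : List (String × Int) :=
  let num := PySem.Int.toChars v
  -- num == num[::-1]: num[::-1] is num.reverse
  if num = num.reverse then
    if pvIsPrimeA v = true then [("PaliPrimes", v)] else []
  else []

-- ===== PORT B =====
-- math.isqrt = Nat.sqrt, math.factorial = Nat.factorial, math.gcd = Nat.gcd (exact on v ≥ 2)
def mapfn_alt (k : Int) (v : Int) : List (String × Int) :=
  let num := PySem.Int.toChars v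
  if num = num.reverse then
    if 2 ≤ v ∧ Nat.gcd v.toNat (Nat.factorial (Nat.sqrt v.toNat)) = 1 then
      [("PaliPrimes", v)]
    else []
  else []

-- ===== PRECONDITION & SPEC =====
def Spec_mapfn (k : Int) (v : Int) (out : List (String × Int)) : Prop := out = mapfn_alt k v
instance (k : Int) (v : Int) (out : List (String × Int)) : Decidable (Spec_mapfn k v out) := by unfold Spec_mapfn; infer_instance

-- ===== CLAIM (what is proved, stated in full; the proofs are below) =====
def Claim_equal_mapfn : Prop := ∀ (k : Int) (v : Int), Dom_mapfn k v → Spec_mapfn k v (mapfn k v)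

-- ===== LEMMAS AND PROOFS =====

lemma pv_not_prime_of_divisor {v c : Int} (hv : 2 ≤ v) (h2 : 2 ≤ c) (hlt : c < v)
    (hdvd : c ∣ v) : ¬ Nat.Prime v.toNat := by
  intro hp
  have e1 : c.toNat = c.natAbs := by omega
  have e2 : v.toNat = v.natAbs := by omega
  have hcd : c.toNat ∣ v.toNat := by
    rw [e1, e2, Int.natAbs_dvd_natAbs]; exact hdvd
  rcases (Nat.Prime.eq_one_or_self_of_dvd hp _ hcd) with h | h <;> omega

lemma pv_minFac_spec {v : Int} (hv : 2 ≤ v) (hnp : ¬ Nat.Prime v.toNat) :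
    ∃ p : Nat, Nat.Prime p ∧ (p : Int) ∣ v ∧ (p : Int) * (p : Int) ≤ v := by
  refine ⟨v.toNat.minFac, Nat.minFac_prime (by omega), ?_, ?_⟩
  · have := Nat.minFac_dvd v.toNat
    have : (v.toNat.minFac : Int) ∣ (v.toNat : Int) := Int.natCast_dvd_natCast.mpr this
    rwa [Int.toNat_of_nonneg (by omega)] at this
  · have h := Nat.minFac_sq_le_self (by omega) hnp
    have : ((v.toNat.minFac * v.toNat.minFac : Nat) : Int) ≤ ((v.toNat : Nat) : Int) := by
      exact_mod_cast (by nlinarith [h] : v.toNat.minFac * v.toNat.minFac ≤ v.toNat)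
    push_cast at this
    rwa [Int.toNat_of_nonneg (by omega)] at this

lemma pv_le_sqrt {v d : Int} (hv : 0 ≤ v) (hd : 0 ≤ d) :
    d ≤ (Nat.sqrt v.toNat : Int) ↔ d * d ≤ v := by
  lift d to Nat using hd
  rw [Int.ofNat_le, Nat.le_sqrt]
  constructor
  · intro h
    calc (d:Int) * d = ((d*d : Nat) : Int) := by push_cast; ring
      _ ≤ (v.toNat : Int) := by exact_mod_cast h
      _ = v := Int.toNat_of_nonneg hv
  · intro h
    have : ((d*d:Nat):Int) ≤ (v.toNat : Int) := by
      rw [Int.toNat_of_nonneg hv]; push_cast; linarith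
    exact_mod_cast this

lemma pv_wheelFind_eq_none (n : Int) (L : List Int) :
    pvWheelFind n L = none ↔ ∀ i ∈ L, ∀ off ∈ [(0:Int), 4, 6, 10, 12, 16, 22, 24],
      ¬ (i + off) ∣ n := by
  induction L with
  | nil => simp [pvWheelFind]
  | cons i rest ih =>
    simp only [pvWheelFind, PySem.Int.mod_eq_zero_iff_dvd]
    split_ifs with h1 h2 h3 h4 h5 h6 h7 h8 <;> simp_all [List.mem_cons]

lemma pv_wheelFind_eq_some {n c : Int} {L : List Int} (h : pvWheelFind n L = some c) :
    ∃ i ∈ L, (∃ off ∈ [(0:Int), 4, 6, 10, 12, 16, 22, 24], c = i + off) ∧ c ∣ n := by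
  induction L with
  | nil => simp [pvWheelFind] at h
  | cons i rest ih =>
    simp only [pvWheelFind, PySem.Int.mod_eq_zero_iff_dvd] at h
    split_ifs at h with h1 h2 h3 h4 h5 h6 h7 h8
    · injection h with h; subst h
      exact ⟨i, by simp, ⟨0, by simp, by ring⟩, h1⟩
    · injection h with h; subst h
      exact ⟨i, by simp, ⟨4, by simp, by ring⟩, h2⟩
    · injection h with h; subst h
      exact ⟨i, by simp, ⟨6, by simp, by ring⟩, h3⟩
    · injection h with h; subst h
      exact ⟨i, by simp, ⟨10, by simp, by ring⟩, h4⟩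
    · injection h with h; subst h
      exact ⟨i, by simp, ⟨12, by simp, by ring⟩, h5⟩
    · injection h with h; subst h
      exact ⟨i, by simp, ⟨16, by simp, by ring⟩, h6⟩
    · injection h with h; subst h
      exact ⟨i, by simp, ⟨22, by simp, by ring⟩, h7⟩
    · injection h with h; subst h
      exact ⟨i, by simp, ⟨24, by simp, by ring⟩, h8⟩
    · obtain ⟨j, hj, hoff, hdvd⟩ := ih h
      exact ⟨j, List.mem_cons_of_mem _ hj, hoff, hdvd⟩

lemma pv_mod30 {p : Int} (h2 : ¬ (2:Int) ∣ p) (h3 : ¬ (3:Int) ∣ p) (h5 : ¬ (5:Int) ∣ p) :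
    p % 30 = 7 ∨ p % 30 = 11 ∨ p % 30 = 13 ∨ p % 30 = 17 ∨ p % 30 = 19 ∨
      p % 30 = 23 ∨ p % 30 = 29 ∨ p % 30 = 1 := by
  have e2 : p % 30 % 2 = p % 2 := Int.emod_emod_of_dvd p (by norm_num)
  have e3 : p % 30 % 3 = p % 3 := Int.emod_emod_of_dvd p (by norm_num)
  have e5 : p % 30 % 5 = p % 5 := Int.emod_emod_of_dvd p (by norm_num)
  have hb0 : 0 ≤ p % 30 := Int.emod_nonneg _ (by norm_num)
  have hb1 : p % 30 < 30 := Int.emod_lt_of_pos _ (by norm_num)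
  set r := p % 30 with hrdef
  interval_cases r <;> omega

lemma pv_wheel_mem {p : Int} (h2 : ¬ (2:Int) ∣ p) (h3 : ¬ (3:Int) ∣ p) (h5 : ¬ (5:Int) ∣ p)
    (h7 : 7 ≤ p) :
    ∃ off ∈ [(0:Int), 4, 6, 10, 12, 16, 22, 24], 30 ∣ (p - off) - 7 ∧ 7 ≤ p - off := by
  rcases pv_mod30 h2 h3 h5 with h | h | h | h | h | h | h | h
  · exact ⟨0, by simp, by omega, by omega⟩
  · exact ⟨4, by simp, by omega, by omega⟩
  · exact ⟨6, by simp, by omega, by omega⟩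
  · exact ⟨10, by simp, by omega, by omega⟩
  · exact ⟨12, by simp, by omega, by omega⟩
  · exact ⟨16, by simp, by omega, by omega⟩
  · exact ⟨22, by simp, by omega, by omega⟩
  · exact ⟨24, by simp, by omega, by omega⟩

lemma pv_LF (v : Int) (hv2 : 2 ≤ v) : v = pvLeastFactor v ↔ Nat.Prime v.toNat := by
  unfold pvLeastFactor
  rw [if_neg (by omega : ¬ v = 0), if_neg (by simp)]
  split_ifs with h2 h3 h5
  · rw [PySem.Int.mod_eq_zero_iff_dvd] at h2
    constructor
    · intro h; rw [h]; decide
    · intro hp; by_contra hne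
      exact pv_not_prime_of_divisor hv2 (by omega) (by omega) h2 hp
  · rw [PySem.Int.mod_eq_zero_iff_dvd] at h3
    rw [PySem.Int.mod_eq_zero_iff_dvd] at h2
    constructor
    · intro h; have : v = 3 := by omega
      subst this; decide
    · intro hp; by_contra hne
      have : 3 < v := by omega
      exact pv_not_prime_of_divisor hv2 (by omega) (by omega) h3 hp
  · rw [PySem.Int.mod_eq_zero_iff_dvd] at h5
    rw [PySem.Int.mod_eq_zero_iff_dvd] at h2
    rw [PySem.Int.mod_eq_zero_iff_dvd] at h3
    constructor
    · intro h; have : v = 5 := by omega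
      subst this; decide
    · intro hp; by_contra hne
      have : 5 < v := by omega
      exact pv_not_prime_of_divisor hv2 (by omega) (by omega) h5 hp
  · rw [PySem.Int.mod_eq_zero_iff_dvd] at h2 h3 h5
    have hv7 : 7 ≤ v := by
      by_contra hlt
      push Not at hlt
      interval_cases v <;> omega
    set m : Int := (Nat.sqrt v.toNat : Int) with hm
    have hm0 : 0 ≤ m := by positivity
    cases hw : pvWheelFind v (PySem.List.pyRange 7 (m + 1) 30) with
    | none =>
      simp only [hw, Option.getD_none]
      constructor
      · intro _
        by_contra hnp
        obtain ⟨p, hpp, hpd, hpsq⟩ := pv_minFac_spec hv2 hnp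
        have hnd2 : ¬ (2:Int) ∣ (p:Int) := fun h => h2 (h.trans hpd)
        have hnd3 : ¬ (3:Int) ∣ (p:Int) := fun h => h3 (h.trans hpd)
        have hnd5 : ¬ (5:Int) ∣ (p:Int) := fun h => h5 (h.trans hpd)
        have hp7 : 7 ≤ (p:Int) := by
          have := hpp.two_le
          have e4 : p ≠ 4 := by rintro rfl; revert hpp; decide
          have e6 : p ≠ 6 := by rintro rfl; revert hpp; decide
          have e2 : (p:Int) ≠ 2 := fun h => hnd2 (h ▸ dvd_refl _)
          have e3 : (p:Int) ≠ 3 := fun h => hnd3 (h ▸ dvd_refl _)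
          have e5 : (p:Int) ≠ 5 := fun h => hnd5 (h ▸ dvd_refl _)
          omega
        obtain ⟨off, hoffmem, hdvd30, hge7⟩ := pv_wheel_mem hnd2 hnd3 hnd5 hp7
        have hoff0 : 0 ≤ off := by
          simp only [List.mem_cons] at hoffmem
          rcases hoffmem with rfl|rfl|rfl|rfl|rfl|rfl|rfl|rfl|h <;> first | omega | simp at h
        have hpm : (p:Int) ≤ m := (pv_le_sqrt (by omega) (by positivity)).mpr hpsq
        have himem : ((p:Int) - off) ∈ PySem.List.pyRange 7 (m + 1) 30 := by
          rw [PySem.List.mem_pyRange_iff_of_pos (by norm_num)]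
          exact ⟨hge7, by omega, by omega⟩
        have := (pv_wheelFind_eq_none v _).mp hw _ himem off hoffmem
        exact this (by simpa using hpd)
      · intro _; trivial
    | some c =>
      simp only [hw, Option.getD_some]
      obtain ⟨i, himem, ⟨off, hoffmem, hcoff⟩, hcd⟩ := pv_wheelFind_eq_some hw
      rw [PySem.List.mem_pyRange_iff_of_pos (by norm_num)] at himem
      obtain ⟨hi7, him, -⟩ := himem
      have hoff24 : 0 ≤ off ∧ off ≤ 24 := by
        simp only [List.mem_cons] at hoffmem
        rcases hoffmem with rfl|rfl|rfl|rfl|rfl|rfl|rfl|rfl|h <;> first | omega | simp at h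
      have hm7 : 7 ≤ m := by omega
      have hmm : m * m ≤ v := (pv_le_sqrt (by omega) hm0).mp le_rfl
      have hcv : c < v := by nlinarith
      constructor
      · intro h; omega
      · intro hp
        exact absurd hp (pv_not_prime_of_divisor hv2 (by omega) hcv hcd)

lemma pv_isPrimeA_eq (v : Int) :
    pvIsPrimeA v = decide (2 ≤ v ∧ Nat.Prime v.toNat) := by
  have hm1 : PySem.Int.mod v 1 = 0 := (PySem.Int.mod_eq_zero_iff_dvd v 1).mpr (one_dvd v)
  unfold pvIsPrimeA
  split_ifs with hg heq
  · rcases hg with h | h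
    · exact absurd hm1 h
    · symm; rw [decide_eq_false]; rintro ⟨h2, -⟩; omega
  · have hv2 : 2 ≤ v := by rcases not_or.mp hg with ⟨-, h⟩; omega
    symm; rw [decide_eq_true_eq]
    exact ⟨hv2, (pv_LF v hv2).mp heq⟩
  · have hv2 : 2 ≤ v := by rcases not_or.mp hg with ⟨-, h⟩; omega
    symm; rw [decide_eq_false]
    rintro ⟨-, hp⟩
    exact heq ((pv_LF v hv2).mpr hp)

-- B's primality criterion: for v ≥ 2, gcd(v, ⌊√v⌋!) = 1 ↔ v prime
lemma pv_gcd_fact_iff (v : Int) (hv2 : 2 ≤ v) :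
    Nat.gcd v.toNat (Nat.factorial (Nat.sqrt v.toNat)) = 1 ↔ Nat.Prime v.toNat := by
  set n := v.toNat with hn
  have hn2 : 2 ≤ n := by omega
  constructor
  · intro hg
    by_contra hnp
    have hmf : Nat.Prime n.minFac := Nat.minFac_prime (by omega)
    have hsq := Nat.minFac_sq_le_self (by omega) hnp
    have hle : n.minFac ≤ Nat.sqrt n := Nat.le_sqrt.mpr (by nlinarith [hsq])
    have hd1 : n.minFac ∣ n := Nat.minFac_dvd n
    have hd2 : n.minFac ∣ Nat.factorial (Nat.sqrt n) := (Nat.Prime.dvd_factorial hmf).mpr hle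
    have : n.minFac ∣ Nat.gcd n (Nat.factorial (Nat.sqrt n)) := Nat.dvd_gcd hd1 hd2
    rw [hg] at this
    have := Nat.le_of_dvd (by norm_num) this
    have := hmf.two_le
    omega
  · intro hp
    have hlt : Nat.sqrt n < n := Nat.sqrt_lt_self (by omega)
    have : ¬ n ∣ Nat.factorial (Nat.sqrt n) := by
      rw [Nat.Prime.dvd_factorial hp]; omega
    exact (Nat.Prime.coprime_iff_not_dvd hp).mpr this

-- ===== VERDICT (by name: the statement is the Claim_ definition above) =====
theorem mapfn_spec : Claim_equal_mapfn := by
  intro k v _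
  show mapfn k v = mapfn_alt k v
  unfold mapfn mapfn_alt
  by_cases hpal : PySem.Int.toChars v = (PySem.Int.toChars v).reverse
  · rw [if_pos hpal, if_pos hpal]
    by_cases hv2 : 2 ≤ v
    · rw [pv_isPrimeA_eq]
      by_cases hp : Nat.Prime v.toNat
      · simp [hv2, hp, (pv_gcd_fact_iff v hv2).mpr hp]
      · have := (not_iff_not.mpr (pv_gcd_fact_iff v hv2)).mpr hp
        simp [hp, this]
    · rw [pv_isPrimeA_eq]
      simp [hv2]
  · rw [if_neg hpal, if_neg hpal]
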